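-- pv_equiv track=rewrite | github.com/adpena/molt | src/molt/frontend/cfg_analysis.py | _compute_predecessors
-- ===== SOURCE A (Python) =====
-- def _compute_predecessors(successors: dict[int, list[int]]) -> dict[int, list[int]]:
--     predecessors: dict[int, list[int]] = {block_id: [] for block_id in successors}
--     for block_id, succs in successors.items():
--         for succ in succs:
--             if succ not in predecessors:
--                 predecessors[succ] = []
--             if block_id not in predecessors[succ]:
--                 predecessors[succ].append(block_id)
--     return predecessors
-- ===== SOURCE B (Python) =====
-- def _compute_predecessors(successors: dict[int, list[int]]) -> dict[int, list[int]]: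
--     # Map inversion by key-major scan: first determine the result's key order
--     # (the original keys, then every new successor target in first-appearance order),
--     # then compute each predecessor list directly as "all blocks whose successor
--     # list mentions this key", in block order -- no mutable accumulation per edge.
--     order = list(successors)
--     for succs in successors.values():
--         for s in succs:
--             if s not in order:
--                 order.append(s)
--     return {k: [b for b, succs in successors.items() if k in succs] for k in order}
-- ===== Notes on version B (the rewrite author's own statement) =====
-- stated objective: alternative
-- what changed: A accumulates predecessor lists edge-by-edge into a mutable dict with an inline membership dedup; B instead computes the result's key order first and then builds each predecessor list directly by a key-major scan of the whole successor map (a comprehension per key), with no mutable accumulation or dedup step.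
import Mathlib
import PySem

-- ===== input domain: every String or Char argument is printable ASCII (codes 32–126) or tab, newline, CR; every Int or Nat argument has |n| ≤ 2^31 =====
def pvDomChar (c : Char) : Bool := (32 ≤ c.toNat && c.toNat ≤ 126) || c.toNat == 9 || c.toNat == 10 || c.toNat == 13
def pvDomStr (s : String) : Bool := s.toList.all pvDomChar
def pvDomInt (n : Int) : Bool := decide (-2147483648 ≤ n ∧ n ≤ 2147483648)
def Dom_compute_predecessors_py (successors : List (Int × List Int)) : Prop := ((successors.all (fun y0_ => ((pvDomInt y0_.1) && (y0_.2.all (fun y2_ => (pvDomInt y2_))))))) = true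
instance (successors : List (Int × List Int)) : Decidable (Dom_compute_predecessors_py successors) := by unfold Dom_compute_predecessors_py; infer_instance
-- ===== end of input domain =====

-- B inverts the map key-major: it computes the result's key order first, then builds each predecessor list by scanning all blocks for that key (no mutable per-edge accumulation); alternative decomposition, not claimed faster.


-- ===== PORT A =====
def compute_predecessors_py (successors : List (Int × List Int)) : List (Int × List Int) :=
  (successors.foldl
    (fun preds p =>
      p.2.foldl
        (fun preds succ =>
          let preds := if preds.contains succ then preds else preds.insert succ []
          if (preds.getD succ []).contains p.1 then preds
          else preds.insert succ (preds.getD succ [] ++ [p.1]))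
        preds)
    (successors.foldl (fun d p => d.insert p.1 ([] : List Int)) PySem.Dict.empty)).items

-- ===== PORT B =====
def compute_predecessors_py_alt (successors : List (Int × List Int)) : List (Int × List Int) :=
  -- pass 1: the result's key order: the original keys, then new successor targets in first-appearance order
  let order := successors.foldl
    (fun order p => p.2.foldl (fun order s => if order.contains s then order else order ++ [s]) order)
    (successors.map Prod.fst)
  -- pass 2: key-major inversion: for each key, all blocks whose successor list mentions it, in block order
  order.map (fun k => (k, (successors.filter (fun p => p.2.contains k)).map Prod.fst))

-- ===== PRECONDITION & SPEC =====
-- Pre_ excludes association lists with duplicate keys: they do not represent any Python dict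
-- (A's argument is a dict, which cannot carry duplicate keys), so nothing is claimed there.
def Pre_compute_predecessors_py (successors : List (Int × List Int)) : Prop :=
  (successors.map Prod.fst).Nodup
instance (successors : List (Int × List Int)) : Decidable (Pre_compute_predecessors_py successors) := by
  unfold Pre_compute_predecessors_py; infer_instance
def pvWitness_compute_predecessors_py : (List (Int × List Int)) := [(0, [1, 1]), (1, [0, 1])]
def Spec_compute_predecessors_py (successors : List (Int × List Int)) (out : List (Int × List Int)) : Prop := out = compute_predecessors_py_alt successors
instance (successors : List (Int × List Int)) (out : List (Int × List Int)) : Decidable (Spec_compute_predecessors_py successors out) := by unfold Spec_compute_predecessors_py; infer_instance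

-- ===== CLAIM (what is proved, stated in full; the proofs are below) =====
def Claim_equal_compute_predecessors_py : Prop := ∀ (successors : List (Int × List Int)), Dom_compute_predecessors_py successors → Pre_compute_predecessors_py successors → Spec_compute_predecessors_py successors (compute_predecessors_py successors)

-- ===== LEMMAS AND PROOFS =====

-- A's inner-loop body and B's order-building step, named
def pvAStep (bid : Int) (preds : PySem.Dict Int (List Int)) (succ : Int) : PySem.Dict Int (List Int) :=
  let preds := if preds.contains succ then preds else preds.insert succ []
  if (preds.getD succ []).contains bid then preds
  else preds.insert succ (preds.getD succ [] ++ [bid])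

def pvOrdStep (order : List Int) (s : Int) : List Int :=
  if order.contains s then order else order ++ [s]

-- B's per-key value: all block ids whose successor list mentions k, in block order
def pvVal (t : List (Int × List Int)) (k : Int) : List Int :=
  ((t.filter (fun p => p.2.contains k)).map Prod.fst)

-- a dict whose items are a map over a key list
def pvMkD (ord : List Int) (h : Int → List Int) : PySem.Dict Int (List Int) :=
  PySem.Dict.mk (ord.map (fun k => (k, h k)))

lemma pvMkD_keys (ord : List Int) (h : Int → List Int) : (pvMkD ord h).keys = ord := by
  simp only [pvMkD, PySem.Dict.keys]
  induction ord with
  | nil => rfl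
  | cons a l ih => simpa using ih

lemma pvMkD_contains (ord : List Int) (h : Int → List Int) (x : Int) :
    (pvMkD ord h).contains x = ord.contains x := by
  rw [PySem.Dict.contains_eq_decide_mem_keys, pvMkD_keys]
  simp [List.contains_iff_mem]

lemma pvMkD_getD (ord : List Int) (h : Int → List Int) (x : Int)
    (hn : ord.Nodup) (hx : x ∈ ord) : (pvMkD ord h).getD x [] = h x := by
  apply PySem.Dict.getD_of_mem_items
  · exact List.mem_map.mpr ⟨x, hx, rfl⟩
  · rw [pvMkD_keys]; exact hn

lemma pvMkD_congr (ord : List Int) (h h' : Int → List Int)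
    (he : ∀ k ∈ ord, h k = h' k) : pvMkD ord h = pvMkD ord h' := by
  apply PySem.Dict.ext
  exact List.map_congr_left (fun k hk => by rw [he k hk])

lemma pvMkD_insert_mem (ord : List Int) (h : Int → List Int) (x : Int) (v : List Int)
    (hx : x ∈ ord) :
    (pvMkD ord h).insert x v = pvMkD ord (fun k => if k = x then v else h k) := by
  apply PySem.Dict.ext
  rw [PySem.Dict.items_insert]
  rw [pvMkD_contains]
  simp only [List.contains_iff_mem, hx, decide_true, if_true]
  show (ord.map _).map _ = _
  rw [List.map_map]
  apply List.map_congr_left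
  intro k _
  by_cases hk : k = x <;> simp [hk, Function.comp]

lemma pvMkD_insert_new (ord : List Int) (h : Int → List Int) (x : Int) (v : List Int)
    (hx : x ∉ ord) :
    (pvMkD ord h).insert x v = pvMkD (ord ++ [x]) (fun k => if k = x then v else h k) := by
  apply PySem.Dict.ext
  rw [PySem.Dict.items_insert]
  rw [pvMkD_contains]
  simp only [List.contains_iff_mem, hx, decide_false, Bool.false_eq_true, if_false]
  show (pvMkD ord h).items ++ _ = _
  simp only [pvMkD, List.map_append, List.map_cons, List.map_nil, if_pos rfl]
  congr 1
  apply List.map_congr_left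
  intro k hk
  have : k ≠ x := fun hkx => hx (hkx ▸ hk)
  simp [this]

lemma pvAStep_mem (bid x : Int) (ord : List Int) (v : Int → List Int)
    (hn : ord.Nodup) (hx : x ∈ ord) :
    pvAStep bid (pvMkD ord v) x =
      if (v x).contains bid then pvMkD ord v
      else pvMkD ord (fun k => if k = x then v x ++ [bid] else v k) := by
  unfold pvAStep
  rw [pvMkD_contains]
  simp only [List.contains_iff_mem, hx, decide_true, if_true]
  rw [pvMkD_getD ord v x hn hx]
  by_cases hb : bid ∈ v x
  · simp [List.contains_iff_mem, hb]
  · simp only [List.contains_iff_mem, hb, decide_false, Bool.false_eq_true, if_false]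
    exact pvMkD_insert_mem ord v x (v x ++ [bid]) hx

lemma pvAStep_new (bid x : Int) (ord : List Int) (v : Int → List Int)
    (hn : ord.Nodup) (hx : x ∉ ord) :
    pvAStep bid (pvMkD ord v) x =
      pvMkD (ord ++ [x]) (fun k => if k = x then [bid] else v k) := by
  have hnd : (ord ++ [x]).Nodup := by
    simp [List.nodup_append, hn]
    exact fun a ha h => hx (h ▸ ha)
  unfold pvAStep
  rw [pvMkD_contains]
  simp only [List.contains_iff_mem, hx, decide_false, Bool.false_eq_true, if_false]
  rw [pvMkD_insert_new ord v x [] hx]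
  rw [pvMkD_getD _ _ x hnd (by simp), if_pos rfl, if_neg (by simp), List.nil_append,
    pvMkD_insert_mem _ _ x [bid] (by simp)]
  apply pvMkD_congr
  intro k _
  by_cases hk : k = x <;> simp [hk]

lemma pvOrdFold_nodup (xs ord : List Int) (hn : ord.Nodup) :
    (xs.foldl pvOrdStep ord).Nodup := by
  induction xs generalizing ord with
  | nil => exact hn
  | cons x xs ih =>
      apply ih
      unfold pvOrdStep
      by_cases hx : x ∈ ord
      · simp [List.contains_iff_mem, hx, hn]
      · simp only [List.contains_iff_mem, hx, decide_false, Bool.false_eq_true, if_false]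
        simp [List.nodup_append, hn]
        exact fun a ha h => hx (h ▸ ha)

lemma pvMem_ordFold (xs ord : List Int) (k : Int) (hk : k ∈ ord) :
    k ∈ xs.foldl pvOrdStep ord := by
  induction xs generalizing ord with
  | nil => exact hk
  | cons x xs ih =>
      refine ih (pvOrdStep ord x) ?_
      unfold pvOrdStep
      by_cases hx : x ∈ ord <;> simp [List.contains_iff_mem, hx, hk]

lemma pvMem_ordFold_of_mem (xs ord : List Int) (k : Int) (hk : k ∈ xs) :
    k ∈ xs.foldl pvOrdStep ord := by
  induction xs generalizing ord with
  | nil => exact absurd hk (List.not_mem_nil)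
  | cons x xs ih =>
      rcases List.mem_cons.mp hk with h | h
      · subst h
        refine pvMem_ordFold xs (pvOrdStep ord k) k ?_
        unfold pvOrdStep
        by_cases hx : k ∈ ord <;> simp [List.contains_iff_mem, hx]
      · exact ih (pvOrdStep ord x) h

-- inner loop: processing one block's successor list
lemma pvInner (bid : Int) (succs : List Int) :
    ∀ (ord processed : List Int) (g : Int → List Int),
      ord.Nodup →
      (∀ k, bid ∉ g k) →
      (∀ k, k ∉ ord → g k = [] ∧ k ∉ processed) →
      succs.foldl (pvAStep bid)
          (pvMkD ord (fun k => g k ++ if processed.contains k then [bid] else []))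
        = pvMkD (succs.foldl pvOrdStep ord)
            (fun k => g k ++ if (processed ++ succs).contains k then [bid] else []) := by
  induction succs with
  | nil => intro ord processed g _ _ _; simp
  | cons x xs ih =>
      intro ord processed g hn hb hout
      simp only [List.foldl_cons]
      by_cases hx : x ∈ ord
      · have hstep : pvOrdStep ord x = ord := by
          simp [pvOrdStep, List.contains_iff_mem, hx]
        rw [hstep, pvAStep_mem bid x ord _ hn hx]
        have hout' : ∀ k, k ∉ ord → g k = [] ∧ k ∉ processed ++ [x] := by
          intro k hk
          refine ⟨(hout k hk).1, ?_⟩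
          simp only [List.mem_append, List.mem_singleton]
          rintro (h | h)
          · exact (hout k hk).2 h
          · exact hk (h ▸ hx)
        by_cases hp : x ∈ processed
        · rw [if_pos (by simp [List.contains_iff_mem, hp, hb x])]
          have hD : (pvMkD ord fun k => g k ++ if processed.contains k then [bid] else [])
              = pvMkD ord (fun k => g k ++ if (processed ++ [x]).contains k then [bid] else []) := by
            apply pvMkD_congr; intro k _
            by_cases hk : k = x <;>
              simp [List.contains_iff_mem, List.mem_append, hk, hp]
          rw [hD, ih ord (processed ++ [x]) g hn hb hout']
          simp only [List.append_assoc, List.singleton_append]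
        · rw [if_neg (by simp [List.contains_iff_mem, hp, hb x])]
          have hD : (pvMkD ord fun k =>
                if k = x then (g x ++ if processed.contains x then [bid] else []) ++ [bid]
                else g k ++ if processed.contains k then [bid] else [])
              = pvMkD ord (fun k => g k ++ if (processed ++ [x]).contains k then [bid] else []) := by
            apply pvMkD_congr; intro k _
            by_cases hk : k = x <;>
              simp [List.contains_iff_mem, List.mem_append, hk, hp]
          rw [hD, ih ord (processed ++ [x]) g hn hb hout']
          simp only [List.append_assoc, List.singleton_append]
      · have hgx : g x = [] := (hout x hx).1
        have hpx : x ∉ processed := (hout x hx).2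
        have hstep : pvOrdStep ord x = ord ++ [x] := by
          simp [pvOrdStep, List.contains_iff_mem, hx]
        rw [hstep, pvAStep_new bid x ord _ hn hx]
        have hn' : (ord ++ [x]).Nodup := by
          simp [List.nodup_append, hn]
          exact fun a ha h => hx (h ▸ ha)
        have hout' : ∀ k, k ∉ ord ++ [x] → g k = [] ∧ k ∉ processed ++ [x] := by
          intro k hk
          simp only [List.mem_append, List.mem_singleton, not_or] at hk
          refine ⟨(hout k hk.1).1, ?_⟩
          simp only [List.mem_append, List.mem_singleton]
          rintro (h | h)
          · exact (hout k hk.1).2 h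
          · exact hk.2 h
        have hD : (pvMkD (ord ++ [x]) fun k =>
              if k = x then [bid] else g k ++ if processed.contains k then [bid] else [])
            = pvMkD (ord ++ [x]) (fun k => g k ++ if (processed ++ [x]).contains k then [bid] else []) := by
          apply pvMkD_congr; intro k _
          by_cases hk : k = x <;>
            simp [List.contains_iff_mem, List.mem_append, hk, hpx, hgx]
        rw [hD, ih (ord ++ [x]) (processed ++ [x]) g hn' hb hout']
        simp only [List.append_assoc, List.singleton_append]

-- outer loop
lemma pvOuter (t : List (Int × List Int)) :
    ∀ (ord : List Int) (g : Int → List Int),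
      ord.Nodup →
      (∀ k b, b ∈ g k → b ∉ t.map Prod.fst) →
      (t.map Prod.fst).Nodup →
      (∀ k, k ∉ ord → g k = []) →
      t.foldl (fun preds p => p.2.foldl (pvAStep p.1) preds) (pvMkD ord g)
        = pvMkD (t.foldl (fun o p => p.2.foldl pvOrdStep o) ord)
            (fun k => g k ++ pvVal t k) := by
  induction t with
  | nil =>
      intro ord g _ _ _ _
      simp only [List.foldl_nil]
      apply pvMkD_congr
      intro k _
      simp [pvVal]
  | cons p rest ih =>
      intro ord g hn hb hkeys hout
      obtain ⟨bid, succs⟩ := p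
      simp only [List.foldl_cons]
      have hstart : pvMkD ord g
          = pvMkD ord (fun k => g k ++ if (List.contains [] k : Bool) then [bid] else []) := by
        apply pvMkD_congr; intro k _; simp
      rw [hstart,
        pvInner bid succs ord [] g hn
          (by intro k hbk
              exact absurd (by simp : bid ∈ (List.map Prod.fst ((bid, succs) :: rest)))
                (hb k bid hbk))
          (by intro k hk; exact ⟨hout k hk, List.not_mem_nil⟩)]
      simp only [List.nil_append]
      have hkeys' : (rest.map Prod.fst).Nodup := by
        simp only [List.map_cons, List.nodup_cons] at hkeys
        exact hkeys.2
      have hbid : bid ∉ rest.map Prod.fst := by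
        simp only [List.map_cons, List.nodup_cons] at hkeys
        exact hkeys.1
      refine Eq.trans (ih (succs.foldl pvOrdStep ord)
          (fun k => g k ++ if succs.contains k then [bid] else [])
          (pvOrdFold_nodup succs ord hn)
          (by intro k b hbk
              simp only [List.mem_append] at hbk
              rcases hbk with h | h
              · intro hmem
                have := hb k b h
                simp only [List.map_cons, List.mem_cons, not_or] at this
                exact this.2 hmem
              · by_cases hc : succs.contains k = true
                · rw [if_pos hc] at h
                  have hbb : b = bid := by simpa using h
                  exact hbb ▸ hbid
                · rw [if_neg hc] at h
                  exact absurd h (List.not_mem_nil))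
          hkeys'
          (by intro k hk
              have hko : k ∉ ord := fun h => hk (pvMem_ordFold succs ord k h)
              have hks : k ∉ succs := fun h => hk (pvMem_ordFold_of_mem succs ord k h)
              simp [hout k hko, List.contains_iff_mem, hks])) ?_
      apply pvMkD_congr
      intro k _
      by_cases hc : k ∈ succs <;>
        simp [pvVal, List.contains_iff_mem, hc, List.filter_cons]

-- the seed dict of A, under nodup keys, is the keys each mapped to []
lemma pvSeed_items (s : List (Int × List Int)) (hn : (s.map Prod.fst).Nodup) :
    s.foldl (fun d p => d.insert p.1 ([] : List Int)) PySem.Dict.empty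
      = pvMkD (s.map Prod.fst) (fun _ => []) := by
  apply PySem.Dict.ext
  rw [PySem.Dict.items_foldl_insert_fresh s Prod.fst (fun _ => ([] : List Int))
    PySem.Dict.empty (by intro a _; exact PySem.Dict.contains_empty _) hn]
  simp [pvMkD, PySem.Dict.empty, PySem.Dict.items, Function.comp_def]

lemma pvPortA_eq (s : List (Int × List Int)) :
    compute_predecessors_py s =
      (s.foldl (fun preds p => p.2.foldl (pvAStep p.1) preds)
        (s.foldl (fun d p => d.insert p.1 ([] : List Int)) PySem.Dict.empty)).items := rfl

lemma pvPortB_eq (s : List (Int × List Int)) :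
    compute_predecessors_py_alt s =
      (s.foldl (fun o p => p.2.foldl pvOrdStep o) (s.map Prod.fst)).map
        (fun k => (k, pvVal s k)) := rfl

-- ===== VERDICT (by name: the statement is the Claim_ definition above) =====
theorem compute_predecessors_py_spec : Claim_equal_compute_predecessors_py := by
  intro s _ hpre
  unfold Spec_compute_predecessors_py
  rw [pvPortA_eq, pvPortB_eq, pvSeed_items s hpre,
    pvOuter s (s.map Prod.fst) (fun _ => []) hpre
      (by intro k b hb; simp at hb) hpre (by intro k _; rfl)]
  simp [pvMkD, PySem.Dict.items]
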